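-- pv_equiv track=rewrite | github.com/SmirnovAleksandrS/Telega_controller | app/calibration_streams.py | infer_output_stream_kinds
-- ===== SOURCE A (Python) =====
-- from typing import Any, Callable, Mapping, Sequence
--
-- def infer_output_stream_kinds(info: Mapping[str, Any]) -> tuple[str, ...]:
--     output_schema = info.get("output_schema")
--     input_schema = info.get("input_schema")
--     kinds: list[str] = []
--     if _schema_has_vector_kind(output_schema, "mag") or _schema_has_vector_kind(input_schema, "mag"):
--         kinds.append("imu.magnetometer_vector")
--     if _schema_has_vector_kind(output_schema, "acc") or _schema_has_vector_kind(input_schema, "acc"):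
--         kinds.append("imu.accel_vector")
--     if _schema_has_vector_kind(output_schema, "accel") or _schema_has_vector_kind(input_schema, "accel"):
--         kinds.append("imu.accel_vector")
--     if _schema_has_vector_kind(output_schema, "gyro") or _schema_has_vector_kind(input_schema, "gyro"):
--         kinds.append("imu.gyro_vector")
--     if _schema_has_heading(output_schema):
--         kinds.append("heading.deg")
--     deduped: list[str] = []
--     seen: set[str] = set()
--     for kind in kinds:
--         if kind in seen:
--             continue
--         seen.add(kind)
--         deduped.append(kind)
--     return tuple(deduped)
--
-- def _schema_has_vector_kind(schema: Any, prefix: str) -> bool: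
--     if not isinstance(schema, Mapping):
--         return False
--     keys = {str(key).strip().lower() for key in schema}
--     if prefix in keys:
--         return True
--     expected = {f"{prefix}_x", f"{prefix}_y", f"{prefix}_z"}
--     return expected.issubset(keys)
--
-- def _schema_has_heading(schema: Any) -> bool:
--     if not isinstance(schema, Mapping):
--         return False
--     keys = {str(key).strip().lower() for key in schema}
--     return "heading" in keys or "heading_deg" in keys
-- ===== SOURCE B (Python) =====
-- from typing import Any, Mapping
--
-- # key -> bit index; heading and heading_deg share one bit
-- _BIT = {
--     "mag": 0, "mag_x": 1, "mag_y": 2, "mag_z": 3,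
--     "acc": 4, "acc_x": 5, "acc_y": 6, "acc_z": 7,
--     "accel": 8, "accel_x": 9, "accel_y": 10, "accel_z": 11,
--     "gyro": 12, "gyro_x": 13, "gyro_y": 14, "gyro_z": 15,
--     "heading": 16, "heading_deg": 16,
-- }
--
-- def _flags(schema: Any) -> int:
--     f = 0
--     if isinstance(schema, Mapping):
--         for key in schema:
--             b = _BIT.get(str(key).strip().lower())
--             if b is not None:
--                 f |= 1 << b
--     return f
--
-- def _bit(x: int, i: int) -> int:
--     return x >> i & 1
--
-- def _vec(x: int, b: int) -> bool:
--     # base key present, or the whole _x/_y/_z triple present in this schema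
--     return bool(_bit(x, b) or (_bit(x, b + 1) and _bit(x, b + 2) and _bit(x, b + 3)))
--
-- def infer_output_stream_kinds(info: Mapping[str, Any]) -> tuple[str, ...]:
--     of = _flags(info.get("output_schema"))
--     inf = _flags(info.get("input_schema"))
--     kinds: list[str] = []
--     if _vec(of, 0) or _vec(inf, 0):
--         kinds.append("imu.magnetometer_vector")
--     if _vec(of, 4) or _vec(inf, 4) or _vec(of, 8) or _vec(inf, 8):
--         kinds.append("imu.accel_vector")
--     if _vec(of, 12) or _vec(inf, 12):
--         kinds.append("imu.gyro_vector")
--     if _bit(of, 16):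
--         kinds.append("heading.deg")
--     return tuple(kinds)
-- ===== Notes on version B (the rewrite author's own statement) =====
-- stated objective: alternative
-- what changed: B replaces A's set-based rule testing (build a normalized key set per helper call, membership + subset tests per prefix, then an explicit seen-set dedup pass) by a single classifying pass over each schema's keys that folds them through a key-to-bit table into one integer bitmask per schema, after which the result list is emitted in fixed order directly from bit tests, with no sets and no dedup pass.
import Mathlib
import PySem

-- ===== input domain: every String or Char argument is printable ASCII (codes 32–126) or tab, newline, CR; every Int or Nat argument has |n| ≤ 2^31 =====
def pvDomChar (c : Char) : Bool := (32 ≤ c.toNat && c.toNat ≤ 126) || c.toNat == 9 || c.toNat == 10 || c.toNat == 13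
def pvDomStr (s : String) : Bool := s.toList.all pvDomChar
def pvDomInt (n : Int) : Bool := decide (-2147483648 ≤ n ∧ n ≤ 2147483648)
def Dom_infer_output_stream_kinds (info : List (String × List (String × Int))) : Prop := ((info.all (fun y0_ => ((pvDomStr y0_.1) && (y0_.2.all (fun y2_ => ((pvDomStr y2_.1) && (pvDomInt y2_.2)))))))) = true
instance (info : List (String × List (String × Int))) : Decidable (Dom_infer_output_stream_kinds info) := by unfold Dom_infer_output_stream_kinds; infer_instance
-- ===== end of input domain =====

-- B classifies each schema's keys in one pass through a key-to-bit table into an integer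
-- bitmask per schema and emits the result directly from bit tests (no key sets, no subset
-- tests, no dedup pass), instead of A's per-prefix set-membership helpers ("alternative").

-- ===== PORT A =====
-- _schema_has_vector_kind: in the typed domain a present schema is always a Mapping
def pvSchemaHasVectorKind (schema : Option (List (String × Int))) (pfx : String) : Bool :=
  match schema with
  | none => false
  | some s =>
    let keys : PySem.Set String := PySem.Set.ofList (s.map fun kv => PySem.Str.lower (PySem.Str.strip kv.1))
    if PySem.Set.contains keys pfx then true
    else PySem.Set.issubset (PySem.Set.ofList [pfx ++ "_x", pfx ++ "_y", pfx ++ "_z"]) keys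

def pvSchemaHasHeading (schema : Option (List (String × Int))) : Bool :=
  match schema with
  | none => false
  | some s =>
    let keys : PySem.Set String := PySem.Set.ofList (s.map fun kv => PySem.Str.lower (PySem.Str.strip kv.1))
    PySem.Set.contains keys "heading" || PySem.Set.contains keys "heading_deg"

def infer_output_stream_kinds (info : List (String × List (String × Int))) : List String :=
  let output_schema := PySem.Dict.get? (PySem.Dict.mk info) "output_schema"
  let input_schema := PySem.Dict.get? (PySem.Dict.mk info) "input_schema"
  let kinds : List String := []
  let kinds := if pvSchemaHasVectorKind output_schema "mag" || pvSchemaHasVectorKind input_schema "mag" then kinds ++ ["imu.magnetometer_vector"] else kinds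
  let kinds := if pvSchemaHasVectorKind output_schema "acc" || pvSchemaHasVectorKind input_schema "acc" then kinds ++ ["imu.accel_vector"] else kinds
  let kinds := if pvSchemaHasVectorKind output_schema "accel" || pvSchemaHasVectorKind input_schema "accel" then kinds ++ ["imu.accel_vector"] else kinds
  let kinds := if pvSchemaHasVectorKind output_schema "gyro" || pvSchemaHasVectorKind input_schema "gyro" then kinds ++ ["imu.gyro_vector"] else kinds
  let kinds := if pvSchemaHasHeading output_schema then kinds ++ ["heading.deg"] else kinds
  (kinds.foldl (fun (st : List String × PySem.Set String) kind =>
      if PySem.Set.contains st.2 kind then st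
      else (st.1 ++ [kind], PySem.Set.add st.2 kind)) ([], PySem.Set.empty)).1

-- ===== PORT B =====
-- the _BIT table (bit indices are nonnegative, so Nat; heading/heading_deg share bit 16)
def pvBitIdx (k : String) : Option Nat :=
  PySem.Dict.get? (PySem.Dict.mk
    [("mag", 0), ("mag_x", 1), ("mag_y", 2), ("mag_z", 3),
     ("acc", 4), ("acc_x", 5), ("acc_y", 6), ("acc_z", 7),
     ("accel", 8), ("accel_x", 9), ("accel_y", 10), ("accel_z", 11),
     ("gyro", 12), ("gyro_x", 13), ("gyro_y", 14), ("gyro_z", 15),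
     ("heading", 16), ("heading_deg", 16)]) k

-- _flags: one classifying pass over the schema's keys into a bitmask
def pvFlags (schema : Option (List (String × Int))) : Nat :=
  match schema with
  | none => 0
  | some s =>
    s.foldl (fun f kv =>
      match pvBitIdx (PySem.Str.lower (PySem.Str.strip kv.1)) with
      | some b => f ||| (1 <<< b)
      | none => f) 0

-- _bit: x >> i & 1
def pvBitOf (x : Nat) (i : Nat) : Nat := (x >>> i) &&& 1

-- _vec: base-key bit, or the whole _x/_y/_z bit triple of this schema
def pvVec (x : Nat) (b : Nat) : Bool :=
  pvBitOf x b == 1 || (pvBitOf x (b + 1) == 1 && pvBitOf x (b + 2) == 1 && pvBitOf x (b + 3) == 1)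

def infer_output_stream_kinds_alt (info : List (String × List (String × Int))) : List String :=
  let of := pvFlags (PySem.Dict.get? (PySem.Dict.mk info) "output_schema")
  let inf := pvFlags (PySem.Dict.get? (PySem.Dict.mk info) "input_schema")
  let kinds : List String := []
  let kinds := if pvVec of 0 || pvVec inf 0 then kinds ++ ["imu.magnetometer_vector"] else kinds
  let kinds := if pvVec of 4 || pvVec inf 4 || pvVec of 8 || pvVec inf 8 then kinds ++ ["imu.accel_vector"] else kinds
  let kinds := if pvVec of 12 || pvVec inf 12 then kinds ++ ["imu.gyro_vector"] else kinds
  let kinds := if pvBitOf of 16 == 1 then kinds ++ ["heading.deg"] else kinds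
  kinds

-- ===== PRECONDITION & SPEC =====
def Spec_infer_output_stream_kinds (info : List (String × List (String × Int))) (out : List String) : Prop := out = infer_output_stream_kinds_alt info
instance (info : List (String × List (String × Int))) (out : List String) : Decidable (Spec_infer_output_stream_kinds info out) := by unfold Spec_infer_output_stream_kinds; infer_instance

-- ===== CLAIM (what is proved, stated in full; the proofs are below) =====
def Claim_equal_infer_output_stream_kinds : Prop := ∀ (info : List (String × List (String × Int))), Dom_infer_output_stream_kinds info → Spec_infer_output_stream_kinds info (infer_output_stream_kinds info)

-- ===== LEMMAS AND PROOFS =====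

lemma pvBitOf_eq_testBit (x i : Nat) : (pvBitOf x i == 1) = x.testBit i := by
  simp [pvBitOf, Nat.and_one_is_mod, Nat.shiftRight_eq_div_pow, Nat.testBit]

lemma pvOr_shift_testBit (f : Nat) (b i : Nat) : (f ||| (1 <<< b)).testBit i = (f.testBit i || (b == i)) := by
  simp [Nat.testBit_or, Nat.one_shiftLeft, Nat.testBit_two_pow, Bool.beq_eq_decide_eq]

lemma pvFlags_fold_testBit (s : List (String × Int)) (f : Nat) (i : Nat) :
    (s.foldl (fun f kv =>
      match pvBitIdx (PySem.Str.lower (PySem.Str.strip kv.1)) with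
      | some b => f ||| (1 <<< b)
      | none => f) f).testBit i
    = (f.testBit i || s.any (fun kv => pvBitIdx (PySem.Str.lower (PySem.Str.strip kv.1)) == some i)) := by
  induction s generalizing f with
  | nil => simp
  | cons kv t ih =>
    simp only [List.foldl_cons, List.any_cons, ih]
    cases h : pvBitIdx (PySem.Str.lower (PySem.Str.strip kv.1)) with
    | none => simp
    | some b =>
      rw [pvOr_shift_testBit]
      simp [Bool.or_assoc]

-- pvBitIdx written as an if-chain (the literal dict lookup unfolded)
lemma pvBitIdx_eq (m : String) : pvBitIdx m =
    (if "mag" == m then some 0 else if "mag_x" == m then some 1 else if "mag_y" == m then some 2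
     else if "mag_z" == m then some 3 else if "acc" == m then some 4 else if "acc_x" == m then some 5
     else if "acc_y" == m then some 6 else if "acc_z" == m then some 7 else if "accel" == m then some 8
     else if "accel_x" == m then some 9 else if "accel_y" == m then some 10 else if "accel_z" == m then some 11
     else if "gyro" == m then some 12 else if "gyro_x" == m then some 13 else if "gyro_y" == m then some 14
     else if "gyro_z" == m then some 15 else if "heading" == m then some 16 else if "heading_deg" == m then some 16
     else none) := by
  simp only [pvBitIdx, PySem.Dict.get?_mk_cons]
  simp [PySem.Dict.get?]

lemma pvBitIdx_0 (m : String) : (pvBitIdx m == some 0) = (m == "mag") := by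
  rw [pvBitIdx_eq]
  simp only [apply_ite (· == some (0 : Nat))]
  by_cases h : m = "mag"
  · subst h; decide
  · simp [h, Ne.symm h]

lemma pvBitIdx_1 (m : String) : (pvBitIdx m == some 1) = (m == "mag_x") := by
  rw [pvBitIdx_eq]
  simp only [apply_ite (· == some (1 : Nat))]
  by_cases h : m = "mag_x"
  · subst h; decide
  · simp [h, Ne.symm h]

lemma pvBitIdx_2 (m : String) : (pvBitIdx m == some 2) = (m == "mag_y") := by
  rw [pvBitIdx_eq]
  simp only [apply_ite (· == some (2 : Nat))]
  by_cases h : m = "mag_y"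
  · subst h; decide
  · simp [h, Ne.symm h]

lemma pvBitIdx_3 (m : String) : (pvBitIdx m == some 3) = (m == "mag_z") := by
  rw [pvBitIdx_eq]
  simp only [apply_ite (· == some (3 : Nat))]
  by_cases h : m = "mag_z"
  · subst h; decide
  · simp [h, Ne.symm h]

lemma pvBitIdx_4 (m : String) : (pvBitIdx m == some 4) = (m == "acc") := by
  rw [pvBitIdx_eq]
  simp only [apply_ite (· == some (4 : Nat))]
  by_cases h : m = "acc"
  · subst h; decide
  · simp [h, Ne.symm h]

lemma pvBitIdx_5 (m : String) : (pvBitIdx m == some 5) = (m == "acc_x") := by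
  rw [pvBitIdx_eq]
  simp only [apply_ite (· == some (5 : Nat))]
  by_cases h : m = "acc_x"
  · subst h; decide
  · simp [h, Ne.symm h]

lemma pvBitIdx_6 (m : String) : (pvBitIdx m == some 6) = (m == "acc_y") := by
  rw [pvBitIdx_eq]
  simp only [apply_ite (· == some (6 : Nat))]
  by_cases h : m = "acc_y"
  · subst h; decide
  · simp [h, Ne.symm h]

lemma pvBitIdx_7 (m : String) : (pvBitIdx m == some 7) = (m == "acc_z") := by
  rw [pvBitIdx_eq]
  simp only [apply_ite (· == some (7 : Nat))]
  by_cases h : m = "acc_z"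
  · subst h; decide
  · simp [h, Ne.symm h]

lemma pvBitIdx_8 (m : String) : (pvBitIdx m == some 8) = (m == "accel") := by
  rw [pvBitIdx_eq]
  simp only [apply_ite (· == some (8 : Nat))]
  by_cases h : m = "accel"
  · subst h; decide
  · simp [h, Ne.symm h]

lemma pvBitIdx_9 (m : String) : (pvBitIdx m == some 9) = (m == "accel_x") := by
  rw [pvBitIdx_eq]
  simp only [apply_ite (· == some (9 : Nat))]
  by_cases h : m = "accel_x"
  · subst h; decide
  · simp [h, Ne.symm h]

lemma pvBitIdx_10 (m : String) : (pvBitIdx m == some 10) = (m == "accel_y") := by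
  rw [pvBitIdx_eq]
  simp only [apply_ite (· == some (10 : Nat))]
  by_cases h : m = "accel_y"
  · subst h; decide
  · simp [h, Ne.symm h]

lemma pvBitIdx_11 (m : String) : (pvBitIdx m == some 11) = (m == "accel_z") := by
  rw [pvBitIdx_eq]
  simp only [apply_ite (· == some (11 : Nat))]
  by_cases h : m = "accel_z"
  · subst h; decide
  · simp [h, Ne.symm h]

lemma pvBitIdx_12 (m : String) : (pvBitIdx m == some 12) = (m == "gyro") := by
  rw [pvBitIdx_eq]
  simp only [apply_ite (· == some (12 : Nat))]
  by_cases h : m = "gyro"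
  · subst h; decide
  · simp [h, Ne.symm h]

lemma pvBitIdx_13 (m : String) : (pvBitIdx m == some 13) = (m == "gyro_x") := by
  rw [pvBitIdx_eq]
  simp only [apply_ite (· == some (13 : Nat))]
  by_cases h : m = "gyro_x"
  · subst h; decide
  · simp [h, Ne.symm h]

lemma pvBitIdx_14 (m : String) : (pvBitIdx m == some 14) = (m == "gyro_y") := by
  rw [pvBitIdx_eq]
  simp only [apply_ite (· == some (14 : Nat))]
  by_cases h : m = "gyro_y"
  · subst h; decide
  · simp [h, Ne.symm h]

lemma pvBitIdx_15 (m : String) : (pvBitIdx m == some 15) = (m == "gyro_z") := by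
  rw [pvBitIdx_eq]
  simp only [apply_ite (· == some (15 : Nat))]
  by_cases h : m = "gyro_z"
  · subst h; decide
  · simp [h, Ne.symm h]

lemma pvBitIdx_16 (m : String) : (pvBitIdx m == some 16) = (m == "heading" || m == "heading_deg") := by
  rw [pvBitIdx_eq]
  simp only [apply_ite (· == some (16 : Nat))]
  by_cases h1 : m = "heading"
  · subst h1; decide
  · by_cases h2 : m = "heading_deg"
    · subst h2; decide
    · simp [h1, h2, Ne.symm h1, Ne.symm h2]


-- membership of a name in A's normalized key set = the corresponding bit of B's mask
lemma pvContains_eq_testBit (s : List (String × Int)) (name : String) (idx : Nat)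
    (h : ∀ m, (pvBitIdx m == some idx) = (m == name)) :
    PySem.Set.contains (PySem.Set.ofList (s.map fun kv => PySem.Str.lower (PySem.Str.strip kv.1))) name
      = (pvFlags (some s)).testBit idx := by
  rw [Bool.eq_iff_iff]
  simp only [pvFlags, pvFlags_fold_testBit, Nat.zero_testBit, Bool.false_or,
    PySem.Set.contains_iff, PySem.Set.mem_ofList, List.mem_map, List.any_eq_true, h]
  constructor
  · rintro ⟨kv, hm, he⟩; exact ⟨kv, hm, by simp [he]⟩
  · rintro ⟨kv, hm, he⟩; exact ⟨kv, hm, by simpa using he⟩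

lemma pvIf_subset (keys : PySem.Set String) (p x y z : String) :
    (if PySem.Set.contains keys p then true
     else PySem.Set.issubset (PySem.Set.ofList [x, y, z]) keys)
    = (PySem.Set.contains keys p || (PySem.Set.contains keys x && PySem.Set.contains keys y && PySem.Set.contains keys z)) := by
  cases h : PySem.Set.contains keys p with
  | true => simp
  | false =>
    simp only [Bool.false_eq_true, if_false, Bool.false_or]
    rw [Bool.eq_iff_iff]
    simp only [PySem.Set.issubset_iff, PySem.Set.mem_ofList, List.mem_cons, List.not_mem_nil,
      or_false, forall_eq_or_imp, forall_eq, Bool.and_eq_true, PySem.Set.contains_iff]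
    tauto

lemma pvHasVec_mag (schema : Option (List (String × Int))) :
    pvSchemaHasVectorKind schema "mag" = pvVec (pvFlags schema) 0 := by
  cases schema with
  | none => decide
  | some s =>
    simp only [pvSchemaHasVectorKind]
    rw [show ("mag" ++ "_x" : String) = "mag_x" from rfl,
        show ("mag" ++ "_y" : String) = "mag_y" from rfl,
        show ("mag" ++ "_z" : String) = "mag_z" from rfl]
    rw [pvIf_subset]
    simp only [pvVec, pvBitOf_eq_testBit]
    rw [pvContains_eq_testBit s "mag" 0 pvBitIdx_0,
        pvContains_eq_testBit s "mag_x" 1 pvBitIdx_1,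
        pvContains_eq_testBit s "mag_y" 2 pvBitIdx_2,
        pvContains_eq_testBit s "mag_z" 3 pvBitIdx_3]

lemma pvHasVec_acc (schema : Option (List (String × Int))) :
    pvSchemaHasVectorKind schema "acc" = pvVec (pvFlags schema) 4 := by
  cases schema with
  | none => decide
  | some s =>
    simp only [pvSchemaHasVectorKind]
    rw [show ("acc" ++ "_x" : String) = "acc_x" from rfl,
        show ("acc" ++ "_y" : String) = "acc_y" from rfl,
        show ("acc" ++ "_z" : String) = "acc_z" from rfl]
    rw [pvIf_subset]
    simp only [pvVec, pvBitOf_eq_testBit]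
    rw [pvContains_eq_testBit s "acc" 4 pvBitIdx_4,
        pvContains_eq_testBit s "acc_x" 5 pvBitIdx_5,
        pvContains_eq_testBit s "acc_y" 6 pvBitIdx_6,
        pvContains_eq_testBit s "acc_z" 7 pvBitIdx_7]

lemma pvHasVec_accel (schema : Option (List (String × Int))) :
    pvSchemaHasVectorKind schema "accel" = pvVec (pvFlags schema) 8 := by
  cases schema with
  | none => decide
  | some s =>
    simp only [pvSchemaHasVectorKind]
    rw [show ("accel" ++ "_x" : String) = "accel_x" from rfl,
        show ("accel" ++ "_y" : String) = "accel_y" from rfl,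
        show ("accel" ++ "_z" : String) = "accel_z" from rfl]
    rw [pvIf_subset]
    simp only [pvVec, pvBitOf_eq_testBit]
    rw [pvContains_eq_testBit s "accel" 8 pvBitIdx_8,
        pvContains_eq_testBit s "accel_x" 9 pvBitIdx_9,
        pvContains_eq_testBit s "accel_y" 10 pvBitIdx_10,
        pvContains_eq_testBit s "accel_z" 11 pvBitIdx_11]

lemma pvHasVec_gyro (schema : Option (List (String × Int))) :
    pvSchemaHasVectorKind schema "gyro" = pvVec (pvFlags schema) 12 := by
  cases schema with
  | none => decide
  | some s =>
    simp only [pvSchemaHasVectorKind]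
    rw [show ("gyro" ++ "_x" : String) = "gyro_x" from rfl,
        show ("gyro" ++ "_y" : String) = "gyro_y" from rfl,
        show ("gyro" ++ "_z" : String) = "gyro_z" from rfl]
    rw [pvIf_subset]
    simp only [pvVec, pvBitOf_eq_testBit]
    rw [pvContains_eq_testBit s "gyro" 12 pvBitIdx_12,
        pvContains_eq_testBit s "gyro_x" 13 pvBitIdx_13,
        pvContains_eq_testBit s "gyro_y" 14 pvBitIdx_14,
        pvContains_eq_testBit s "gyro_z" 15 pvBitIdx_15]

lemma pvHasHeading_eq (schema : Option (List (String × Int))) :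
    pvSchemaHasHeading schema = (pvBitOf (pvFlags schema) 16 == 1) := by
  cases schema with
  | none => decide
  | some s =>
    simp only [pvSchemaHasHeading, pvBitOf_eq_testBit]
    rw [Bool.eq_iff_iff]
    simp only [pvFlags, pvFlags_fold_testBit, Nat.zero_testBit, Bool.false_or,
      PySem.Set.contains_iff, PySem.Set.mem_ofList, List.mem_map, List.any_eq_true,
      pvBitIdx_16, Bool.or_eq_true, beq_iff_eq]
    constructor
    · rintro (⟨kv, hm, he⟩ | ⟨kv, hm, he⟩)
      · exact ⟨kv, hm, Or.inl he⟩
      · exact ⟨kv, hm, Or.inr he⟩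
    · rintro ⟨kv, hm, he | he⟩
      · exact Or.inl ⟨kv, hm, he⟩
      · exact Or.inr ⟨kv, hm, he⟩

-- ===== VERDICT (by name: the statement is the Claim_ definition above) =====
theorem infer_output_stream_kinds_spec : Claim_equal_infer_output_stream_kinds := by
  intro info _
  unfold Spec_infer_output_stream_kinds
  unfold infer_output_stream_kinds infer_output_stream_kinds_alt
  simp only [pvHasVec_mag, pvHasVec_acc, pvHasVec_accel, pvHasVec_gyro, pvHasHeading_eq]
  generalize pvVec (pvFlags (PySem.Dict.get? (PySem.Dict.mk info) "output_schema")) 0 = a1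
  generalize pvVec (pvFlags (PySem.Dict.get? (PySem.Dict.mk info) "input_schema")) 0 = a2
  generalize pvVec (pvFlags (PySem.Dict.get? (PySem.Dict.mk info) "output_schema")) 4 = b1
  generalize pvVec (pvFlags (PySem.Dict.get? (PySem.Dict.mk info) "input_schema")) 4 = b2
  generalize pvVec (pvFlags (PySem.Dict.get? (PySem.Dict.mk info) "output_schema")) 8 = c1
  generalize pvVec (pvFlags (PySem.Dict.get? (PySem.Dict.mk info) "input_schema")) 8 = c2
  generalize pvVec (pvFlags (PySem.Dict.get? (PySem.Dict.mk info) "output_schema")) 12 = d1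
  generalize pvVec (pvFlags (PySem.Dict.get? (PySem.Dict.mk info) "input_schema")) 12 = d2
  generalize (pvBitOf (pvFlags (PySem.Dict.get? (PySem.Dict.mk info) "output_schema")) 16 == 1) = e1
  cases a1 <;> cases a2 <;> cases b1 <;> cases b2 <;> cases c1 <;> cases c2 <;> cases d1 <;> cases d2 <;> cases e1 <;> decide
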